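-- pv_equiv track=rewrite | github.com/sefcom/Witcher | seclab-targets/calculate_coverage.py | calc_coverage
-- ===== SOURCE A (Python) =====
-- def calc_coverage(jout):
--     covered_cnt = 0
--     missed_cnt = 0
--     total_cnt = 0
--     for path, codecovs in jout.items():
--         for line, cov_val in codecovs.items():
--             if cov_val > 0:
--                 covered_cnt += 1
--             else:
--                 missed_cnt += 1
--             total_cnt += 1
--     return covered_cnt, missed_cnt, total_cnt
-- ===== SOURCE B (Python) =====
-- def _pos(vals, lo, hi):
--     # count positive entries in vals[lo:hi] by divide and conquer
--     if hi - lo <= 0: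
--         return 0
--     if hi - lo == 1:
--         return 1 if vals[lo] > 0 else 0
--     mid = (lo + hi) // 2
--     return _pos(vals, lo, mid) + _pos(vals, mid, hi)
--
-- def calc_coverage(jout):
--     flat = [v for codecovs in jout.values() for v in codecovs.values()]
--     total = len(flat)
--     covered = _pos(flat, 0, total)
--     return covered, total - covered, total
-- ===== Notes on version B (the rewrite author's own statement) =====
-- stated objective: alternative
-- what changed: Flattens the nested dicts into one list of coverage values, counts the positive ones by a divide-and-conquer recursion over index ranges (instead of A's nested loop with three running counters), and derives missed by subtraction; correct because counting positives is associative over any split of the list.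
import Mathlib
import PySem

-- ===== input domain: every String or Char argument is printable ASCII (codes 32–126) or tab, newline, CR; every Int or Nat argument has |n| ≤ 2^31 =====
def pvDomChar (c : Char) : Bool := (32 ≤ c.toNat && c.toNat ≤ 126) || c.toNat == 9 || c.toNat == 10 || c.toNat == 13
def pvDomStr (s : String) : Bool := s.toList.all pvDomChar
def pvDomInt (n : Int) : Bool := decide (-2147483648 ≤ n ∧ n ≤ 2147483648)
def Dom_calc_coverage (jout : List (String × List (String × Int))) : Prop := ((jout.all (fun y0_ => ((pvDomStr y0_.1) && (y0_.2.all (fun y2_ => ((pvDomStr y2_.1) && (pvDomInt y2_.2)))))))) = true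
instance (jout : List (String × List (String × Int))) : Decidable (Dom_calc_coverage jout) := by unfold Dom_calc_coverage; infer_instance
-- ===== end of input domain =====

-- B replaces A's nested loop with three running counters by: flatten, divide-and-conquer
-- count of positive values, and missed derived by subtraction (objective: alternative).

-- ===== PORT A =====
-- Port of A: nested fold over the dict items, maintaining (covered, missed, total).
def calc_coverage (jout : List (String × List (String × Int))) : Int × Int × Int :=
  jout.foldl (fun acc pc =>
    pc.2.foldl (fun acc lc =>
      let acc1 := if lc.2 > 0 then (acc.1 + 1, acc.2.1, acc.2.2) else (acc.1, acc.2.1 + 1, acc.2.2)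
      (acc1.1, acc1.2.1, acc1.2.2 + 1)) acc) (0, 0, 0)

-- ===== PORT B =====
-- Port of B's helper _pos: divide-and-conquer count of positives in vals[lo:hi].
-- vals[lo] is ported as (pyGet? vals lo).getD 0; the index is always in range at every call.
def pvPos (vals : List Int) (lo hi : Int) : Int :=
  if hi - lo ≤ 0 then 0
  else if hi - lo = 1 then (if 0 < (PySem.List.pyGet? vals lo).getD 0 then 1 else 0)
  else
    pvPos vals lo (PySem.Int.floordiv (lo + hi) 2) + pvPos vals (PySem.Int.floordiv (lo + hi) 2) hi
termination_by (hi - lo).toNat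
decreasing_by
  all_goals
    rw [PySem.Int.floordiv_eq_ediv_of_pos (by omega : (0:Int) < 2)]
    omega

-- Port of B: flatten all coverage values, total = length, covered by _pos, missed by subtraction.
def calc_coverage_alt (jout : List (String × List (String × Int))) : Int × Int × Int :=
  let flat := jout.flatMap (fun codecovs => codecovs.2.map (fun lc => lc.2))
  let total : Int := flat.length
  let covered := pvPos flat 0 total
  (covered, total - covered, total)

-- ===== PRECONDITION & SPEC =====
def Spec_calc_coverage (jout : List (String × List (String × Int))) (out : Int × Int × Int) : Prop := out = calc_coverage_alt jout
instance (jout : List (String × List (String × Int))) (out : Int × Int × Int) : Decidable (Spec_calc_coverage jout out) := by unfold Spec_calc_coverage; infer_instance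

-- ===== CLAIM (what is proved, stated in full; the proofs are below) =====
def Claim_equal_calc_coverage : Prop := ∀ (jout : List (String × List (String × Int))), Dom_calc_coverage jout → Spec_calc_coverage jout (calc_coverage jout)

-- ===== LEMMAS AND PROOFS =====

-- pvPos counts the positive entries of the segment [lo, hi) of vals.
lemma pvPos_eq (vals : List Int) (lo hi : Int) (h0 : 0 ≤ lo) (hle : lo ≤ hi)
    (hhi : hi ≤ vals.length) :
    pvPos vals lo hi =
      (((vals.drop lo.toNat).take (hi - lo).toNat).countP (fun v => decide (0 < v)) : Int) := by
  have H : ∀ n : ℕ, ∀ lo hi : ℤ, 0 ≤ lo → lo ≤ hi → hi ≤ vals.length → (hi - lo).toNat = n →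
      pvPos vals lo hi =
        (((vals.drop lo.toNat).take (hi - lo).toNat).countP (fun v => decide (0 < v)) : Int) := by
    intro n
    induction n using Nat.strong_induction_on with
    | _ n ih =>
      intro lo hi h0 hle hhi hn
      rw [pvPos]
      by_cases hz : hi - lo ≤ 0
      · have hlohi : (hi - lo).toNat = 0 := by omega
        simp [hz, hlohi]
      · by_cases h1 : hi - lo = 1
        · have hltn : lo.toNat < vals.length := by omega
          simp only [h1]
          norm_num
          rw [PySem.List.pyGet?_of_nonneg vals h0]
          simp only [List.getElem?_eq_getElem hltn]
          by_cases hp : 0 < vals[lo.toNat] <;>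
            simp [hp, List.take_one_drop_eq_of_lt_length hltn]
        · have hmid : PySem.Int.floordiv (lo + hi) 2 = (lo + hi) / 2 :=
            PySem.Int.floordiv_eq_ediv_of_pos (by omega)
          have hb1 : lo < PySem.Int.floordiv (lo + hi) 2 := by rw [hmid]; omega
          have hb2 : PySem.Int.floordiv (lo + hi) 2 < hi := by rw [hmid]; omega
          simp only [hz, h1, reduceIte]
          rw [ih (PySem.Int.floordiv (lo + hi) 2 - lo).toNat (by omega) lo _ h0 (by omega) (by omega) rfl,
              ih (hi - PySem.Int.floordiv (lo + hi) 2).toNat (by omega) _ hi (by omega) (by omega) hhi rfl]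
          have hsplit : (hi - lo).toNat =
              (PySem.Int.floordiv (lo + hi) 2 - lo).toNat + (hi - PySem.Int.floordiv (lo + hi) 2).toNat := by
            omega
          rw [hsplit, List.take_add, List.countP_append, List.drop_drop]
          have hd : lo.toNat + (PySem.Int.floordiv (lo + hi) 2 - lo).toNat
              = (PySem.Int.floordiv (lo + hi) 2).toNat := by omega
          rw [hd]
          exact (Nat.cast_add _ _).symm
  exact H (hi - lo).toNat lo hi h0 hle hhi rfl

lemma inner_fold (l : List (String × Int)) (a b c : Int) :
    l.foldl (fun acc lc =>
      let acc1 := if lc.2 > 0 then (acc.1 + 1, acc.2.1, acc.2.2) else (acc.1, acc.2.1 + 1, acc.2.2)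
      (acc1.1, acc1.2.1, acc1.2.2 + 1)) (a, b, c)
    = (a + ((l.map (fun lc => lc.2)).countP (fun v => decide (0 < v)) : Int),
       b + ((l.length : Int) - ((l.map (fun lc => lc.2)).countP (fun v => decide (0 < v)) : Int)),
       c + (l.length : Int)) := by
  induction l generalizing a b c with
  | nil => simp
  | cons hd tl ih =>
    simp only [List.foldl_cons, List.map_cons, List.countP_cons, List.length_cons]
    by_cases h : hd.2 > 0 <;> simp [h, ih] <;> constructor <;> push_cast <;> ring

lemma calc_coverage_eq (jout : List (String × List (String × Int))) :
    calc_coverage jout = calc_coverage_alt jout := by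
  have hflat :
      ∀ a b c : Int,
        jout.foldl (fun acc pc =>
          pc.2.foldl (fun acc lc =>
            let acc1 := if lc.2 > 0 then (acc.1 + 1, acc.2.1, acc.2.2) else (acc.1, acc.2.1 + 1, acc.2.2)
            (acc1.1, acc1.2.1, acc1.2.2 + 1)) acc) (a, b, c)
        = (a + ((jout.flatMap (fun pc => pc.2.map (fun lc => lc.2))).countP (fun v => decide (0 < v)) : Int),
           b + (((jout.flatMap (fun pc => pc.2.map (fun lc => lc.2))).length : Int)
                - ((jout.flatMap (fun pc => pc.2.map (fun lc => lc.2))).countP (fun v => decide (0 < v)) : Int)),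
           c + ((jout.flatMap (fun pc => pc.2.map (fun lc => lc.2))).length : Int)) := by
    induction jout with
    | nil => intro a b c; simp
    | cons hd tl ih =>
      intro a b c
      simp only [List.foldl_cons, inner_fold, ih, List.flatMap_cons, List.countP_append,
        List.length_append, List.length_map]
      refine Prod.ext ?_ (Prod.ext ?_ ?_) <;> push_cast <;> ring
  unfold calc_coverage calc_coverage_alt
  simp only [hflat 0 0 0]
  rw [pvPos_eq _ 0 _ (by omega) (by exact_mod_cast Nat.zero_le _) le_rfl]
  simp only [sub_zero, Int.toNat_zero, List.drop_zero, Int.toNat_natCast, List.take_length, zero_add]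

-- ===== VERDICT (by name: the statement is the Claim_ definition above) =====
theorem calc_coverage_spec : Claim_equal_calc_coverage := by
  intro jout _
  unfold Spec_calc_coverage
  exact calc_coverage_eq jout
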